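-- pv_equiv track=rewrite | github.com/weiz0823/cryptoPy | asn1.py | decode_id_octets
-- ===== SOURCE A (Python) =====
-- def decode_id_octets(octets, index=0):
--     """Decode identifier octets in ASN.1.
--
--     Return: tag, isconstructed, class_type, end_index
--     tag -- tag number
--     isconstructed -- 1 for constructed, 0 for primitive
--     class_type -- Universal / Application / ...
--     end_index -- end of identifier octets
--     """
--     class_type = (octets[index] & 0xC0) >> 6
--     isconstructed = bool(octets[index] & 0x20)
--     tag = octets[index] & 0x1F
--     end_index = index + 1
--     if tag == 0x1F:
--         tag = 0
--         i = index + 1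
--         try:
--             while octets[i] & 0x80:
--                 tag |= octets[i] & 0x7F
--                 tag <<= 7
--                 i += 1
--             tag |= octets[i]
--             end_index = i + 1
--         except IndexError:
--             raise DecodeError("length of octets not enough")
--         if tag < 0x1F:
--             raise DecodeError("identifier octets not properly encoded")
--     return tag, isconstructed, class_type, end_index
-- ===== SOURCE B (Python) =====
-- # Alternative decomposition: early return for the short form; for the long form,
-- # first count the continuation bytes, then fold the tag from indexed reads in a
-- # second pass (A fuses detection and accumulation in one loop).
-- class DecodeError(Exception):
--     pass
--
--
-- def decode_id_octets(octets, index=0):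
--     first = octets[index]
--     short = first & 0x1F
--     if short != 0x1F:
--         return short, bool(first & 0x20), (first & 0xC0) >> 6, index + 1
--     n = 0
--     try:
--         while octets[index + 1 + n] & 0x80:
--             n += 1
--         last = octets[index + 1 + n]
--     except IndexError:
--         raise DecodeError("length of octets not enough")
--     tag = 0
--     for k in range(n):
--         tag = (tag << 7) | (octets[index + 1 + k] & 0x7F)
--     tag = (tag << 7) | last
--     if tag < 0x1F:
--         raise DecodeError("identifier octets not properly encoded")
--     return tag, bool(first & 0x20), (first & 0xC0) >> 6, index + n + 2
-- ===== Notes on version B (the rewrite author's own statement) =====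
-- stated objective: alternative
-- what changed: A decodes a long-form tag in one fused loop that interleaves boundary detection with bit accumulation and exits through a single return; B returns early for short-form tags and handles the long form in two staged passes: a counting scan that only finds the number of continuation bytes, then a separate indexed fold that accumulates the tag.
import Mathlib
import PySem

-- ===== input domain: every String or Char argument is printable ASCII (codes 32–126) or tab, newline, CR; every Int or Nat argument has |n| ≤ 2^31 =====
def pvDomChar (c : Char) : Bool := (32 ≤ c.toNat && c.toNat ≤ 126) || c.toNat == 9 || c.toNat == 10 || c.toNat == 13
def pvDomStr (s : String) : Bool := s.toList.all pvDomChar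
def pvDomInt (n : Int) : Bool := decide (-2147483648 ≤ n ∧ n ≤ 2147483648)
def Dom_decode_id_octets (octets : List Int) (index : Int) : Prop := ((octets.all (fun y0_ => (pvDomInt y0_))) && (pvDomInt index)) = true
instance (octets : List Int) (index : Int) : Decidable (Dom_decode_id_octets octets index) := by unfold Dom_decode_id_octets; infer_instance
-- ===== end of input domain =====

-- B returns early for short-form tags and decodes the long form in two staged passes
-- (count the continuation bytes, then fold the tag from indexed reads) instead of A's
-- single fused scan-and-accumulate loop; same return value, same cost (objective: alternative).

-- used by both ports for termination of the long-form scans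
theorem pvGet_some_lt {octets : List Int} {i : Int} {b : Int}
    (h : PySem.List.pyGet? octets i = some b) : i < (octets.length : Int) := by
  by_contra hc
  have hn : PySem.List.pyGet? octets i = none :=
    (PySem.List.pyGet?_eq_none_iff octets i).mpr (by unfold PySem.Raise.InRange; omega)
  rw [hn] at h
  simp at h

-- ===== PORT A =====
-- the 'while octets[i] & 0x80' loop of A, fused accumulation; none = raised DecodeError (IndexError caught)
def DIO_loopA (octets : List Int) (i : Int) (tag : Int) : Option (Int × Int) :=
  match h : PySem.List.pyGet? octets i with
  | none => none
  | some b =>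
    if PySem.Int.band b 0x80 ≠ 0 then
      DIO_loopA octets (i + 1) ((PySem.Int.bor tag (PySem.Int.band b 0x7F)) <<< 7)
    else some (PySem.Int.bor tag b, i + 1)
  termination_by ((octets.length : Int) - i).toNat
  decreasing_by have := pvGet_some_lt h; omega

def decode_id_octets (octets : List Int) (index : Int) : Int × Bool × Int × Int :=
  match PySem.List.pyGet? octets index with
  | none => (0, false, 0, 0)  -- IndexError: excluded by Pre_
  | some b0 =>
    let class_type := (PySem.Int.band b0 0xC0) >>> 6
    let isconstructed := PySem.Int.band b0 0x20 ≠ 0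
    let tag := PySem.Int.band b0 0x1F
    let end_index := index + 1
    if tag = 0x1F then
      match DIO_loopA octets (index + 1) 0 with
      | none => (0, false, 0, 0)  -- DecodeError "length of octets not enough": excluded by Pre_
      | some (t, e) =>
        if t < 0x1F then (0, false, 0, 0)  -- DecodeError "not properly encoded": excluded by Pre_
        else (t, isconstructed, class_type, e)
    else (tag, isconstructed, class_type, end_index)

-- ===== PORT B =====
-- B pass 1: 'n = 0; while octets[index + 1 + n] & 0x80: n += 1' — count the continuation
-- bytes only; none = the counting ran off the list (IndexError caught → DecodeError)
def DIO_countB (octets : List Int) (index : Int) (n : Nat) : Option Nat :=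
  match h : PySem.List.pyGet? octets (index + 1 + (n : Int)) with
  | none => none
  | some b => if PySem.Int.band b 0x80 ≠ 0 then DIO_countB octets index (n + 1) else some n
  termination_by ((octets.length : Int) - (index + 1 + n)).toNat
  decreasing_by have := pvGet_some_lt h; omega

def decode_id_octets_alt (octets : List Int) (index : Int) : Int × Bool × Int × Int :=
  match PySem.List.pyGet? octets index with
  | none => (0, false, 0, 0)  -- IndexError: excluded by Pre_
  | some first =>
    let short := PySem.Int.band first 0x1F
    if short ≠ 0x1F then
      (short, PySem.Int.band first 0x20 ≠ 0, (PySem.Int.band first 0xC0) >>> 6, index + 1)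
    else
      match DIO_countB octets index 0 with
      | none => (0, false, 0, 0)  -- DecodeError "length of octets not enough": excluded by Pre_
      | some n =>
        -- 'last = octets[index + 1 + n]': the byte the while-condition just inspected, so in range (getD unreachable)
        let last := (PySem.List.pyGet? octets (index + 1 + (n : Int))).getD 0
        -- B pass 2: 'for k in range(n): tag = (tag << 7) | (octets[index + 1 + k] & 0x7F)' —
        -- every read is below the counted boundary, so in range (getD unreachable)
        let t := (List.range n).foldl
          (fun a (k : Nat) => PySem.Int.bor (a <<< 7)
            (PySem.Int.band ((PySem.List.pyGet? octets (index + 1 + (k : Int))).getD 0) 0x7F)) 0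
        let tag := PySem.Int.bor (t <<< 7) last
        if tag < 0x1F then (0, false, 0, 0)  -- DecodeError "not properly encoded": excluded by Pre_
        else (tag, PySem.Int.band first 0x20 ≠ 0, (PySem.Int.band first 0xC0) >>> 6, index + (n : Int) + 2)

-- ===== PRECONDITION & SPEC =====
-- Pre_ excludes exactly the inputs on which A raises: index out of range (IndexError), a long-form
-- tag whose continuation runs off the list (DecodeError), or a long-form tag that decodes below 0x1F
-- (DecodeError "not properly encoded").
def Pre_decode_id_octets (octets : List Int) (index : Int) : Prop :=
  ∃ b0, PySem.List.pyGet? octets index = some b0 ∧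
    (PySem.Int.band b0 0x1F ≠ 0x1F ∨
      ∃ m < 2 * octets.length + 1,
        (∀ t < m, ∃ b, PySem.List.pyGet? octets (index + 1 + t) = some b ∧ PySem.Int.band b 0x80 ≠ 0) ∧
        ∃ b, PySem.List.pyGet? octets (index + 1 + m) = some b ∧ PySem.Int.band b 0x80 = 0 ∧
          (0x1F ≤ b ∨ (0 ≤ b ∧ ∃ t < m, ∃ c, PySem.List.pyGet? octets (index + 1 + t) = some c ∧ PySem.Int.band c 0x7F ≠ 0)))
instance (octets : List Int) (index : Int) : Decidable (Pre_decode_id_octets octets index) := by unfold Pre_decode_id_octets; infer_instance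

def pvWitness_decode_id_octets : List Int × Int := ([0x5F, 0x81, 0x23], 0)

def Spec_decode_id_octets (octets : List Int) (index : Int) (out : Int × Bool × Int × Int) : Prop := out = decode_id_octets_alt octets index
instance (octets : List Int) (index : Int) (out : Int × Bool × Int × Int) : Decidable (Spec_decode_id_octets octets index out) := by unfold Spec_decode_id_octets; infer_instance

-- ===== CLAIM (what is proved, stated in full; the proofs are below) =====
def Claim_equal_decode_id_octets : Prop := ∀ (octets : List Int) (index : Int), Dom_decode_id_octets octets index → Pre_decode_id_octets octets index → Spec_decode_id_octets octets index (decode_id_octets octets index)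

-- ===== LEMMAS AND PROOFS =====

-- proof-side intermediate: the list of masked continuation bytes, the raw terminator and the end index
def DIO_scan (octets : List Int) (i : Int) : Option (List Int × Int × Int) :=
  match h : PySem.List.pyGet? octets i with
  | none => none
  | some b =>
    if PySem.Int.band b 0x80 ≠ 0 then
      match DIO_scan octets (i + 1) with
      | none => none
      | some (parts, last, e) => some ((PySem.Int.band b 0x7F) :: parts, last, e)
    else some ([], b, i + 1)
  termination_by ((octets.length : Int) - i).toNat
  decreasing_by have := pvGet_some_lt h; omega

-- A's fused fold from accumulator t <<< 7 equals the shift-first fold over the parts plus the raw last byte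
theorem pvFoldAB : ∀ (parts : List Int) (t last : Int),
    PySem.Int.bor (parts.foldl (fun a b => (PySem.Int.bor a b) <<< 7) (t <<< 7)) last
      = (parts ++ [last]).foldl (fun a b => PySem.Int.bor (a <<< 7) b) t := by
  intro parts
  induction parts with
  | nil => intro t last; simp [List.foldl]
  | cons b ps ih =>
      intro t last
      have := ih (PySem.Int.bor (t <<< 7) b) last
      simpa [List.foldl] using this

-- A's loop equals the scan followed by A-style folding from the accumulator
theorem pvLoopA_eq_scan (octets : List Int) (i tag : Int) :
    DIO_loopA octets i tag
      = (DIO_scan octets i).map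
          (fun r => (PySem.Int.bor (r.1.foldl (fun a b => (PySem.Int.bor a b) <<< 7) tag) r.2.1, r.2.2)) := by
  induction i, tag using DIO_loopA.induct octets with
  | case1 i tag h =>
      rw [DIO_loopA, DIO_scan]
      split <;> simp_all
  | case2 i tag b h hbit ih =>
      rw [DIO_loopA, DIO_scan]
      split <;> rename_i heq <;> rw [h] at heq
      · exact absurd heq (by simp)
      · rename_i b' ; injection heq with hb ; subst hb
        rw [if_pos hbit, ih]
        cases hr : DIO_scan octets (i + 1) with
        | none => simp [hbit]
        | some r => obtain ⟨parts, r2⟩ := r; simp [hbit, List.foldl]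
  | case3 i tag b h hbit =>
      rw [DIO_loopA, DIO_scan]
      split <;> rename_i heq <;> rw [h] at heq
      · exact absurd heq (by simp)
      · rename_i b' ; injection heq with hb ; subst hb
        rw [if_neg hbit]
        simp only [not_not] at hbit
        simp [hbit]

-- B's counting pass plus indexed fold equals the scan
theorem pvScan_eq (octets : List Int) (i : Int) :
    DIO_scan octets i = match PySem.List.pyGet? octets i with
      | none => none
      | some b =>
        if PySem.Int.band b 0x80 ≠ 0 then
          match DIO_scan octets (i + 1) with
          | none => none
          | some (parts, last, e) => some ((PySem.Int.band b 0x7F) :: parts, last, e)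
        else some ([], b, i + 1) := by
  rw [DIO_scan]; split <;> rename_i heq <;> rw [heq]

theorem pvCountB_eq (octets : List Int) (index : Int) (n : Nat) :
    DIO_countB octets index n = match PySem.List.pyGet? octets (index + 1 + (n : Int)) with
      | none => none
      | some b => if PySem.Int.band b 0x80 ≠ 0 then DIO_countB octets index (n + 1) else some n := by
  rw [DIO_countB]; split <;> rename_i heq <;> rw [heq]

theorem pvScanCount (octets : List Int) (index : Int) : ∀ m : Nat,
    (match DIO_scan octets (index + 1 + (m : Int)) with
     | none => DIO_countB octets index m = none
     | some (parts, last, e) =>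
         DIO_countB octets index m = some (m + parts.length) ∧
         e = index + 1 + (m : Int) + parts.length + 1 ∧
         PySem.List.pyGet? octets (index + 1 + ((m + parts.length : Nat) : Int)) = some last ∧
         ∀ s : Int, (List.range' m parts.length).foldl
             (fun a (k : Nat) => PySem.Int.bor (a <<< 7)
               (PySem.Int.band ((PySem.List.pyGet? octets (index + 1 + (k : Int))).getD 0) 0x7F)) s
           = parts.foldl (fun a b => PySem.Int.bor (a <<< 7) b) s) := by
  intro m
  induction m using DIO_countB.induct octets index with
  | case1 n h =>
      rw [pvScan_eq, pvCountB_eq, h]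
  | case2 n b h hbit ih =>
      rw [pvScan_eq, pvCountB_eq, h]
      dsimp only
      rw [if_pos hbit, if_pos hbit]
      have hcast : index + 1 + (n : Int) + 1 = index + 1 + ((n + 1 : Nat) : Int) := by push_cast; ring
      rw [hcast]
      cases hr : DIO_scan octets (index + 1 + ((n + 1 : Nat) : Int)) with
      | none => rw [hr] at ih; simpa using ih
      | some r =>
          obtain ⟨parts, last, e⟩ := r
          rw [hr] at ih
          obtain ⟨ih1, ih2, ih3, ih4⟩ := ih
          refine ⟨by rw [ih1]; congr 1; simp; omega,
            by rw [ih2]; simp only [List.length_cons]; push_cast; ring, ?_, ?_⟩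
          · have hc2 : ((n + (parts.length + 1) : Nat) : Int) = (((n + 1) + parts.length : Nat) : Int) := by
              push_cast; ring
            simpa [hc2] using ih3
          · intro s
            simp only [List.length_cons, List.range'_succ, List.foldl_cons, h, Option.getD_some]
            exact ih4 _
  | case3 n b h hbit =>
      rw [pvScan_eq, pvCountB_eq, h]
      dsimp only
      rw [if_neg hbit, if_neg hbit]
      refine ⟨by simp, by simp, by simpa using h, by simp⟩

-- ===== VERDICT (by name: the statement is the Claim_ definition above) =====
theorem decode_id_octets_spec : Claim_equal_decode_id_octets := by
  intro octets index _ _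
  unfold Spec_decode_id_octets decode_id_octets decode_id_octets_alt
  cases h0 : PySem.List.pyGet? octets index with
  | none => rfl
  | some b0 =>
      simp only
      by_cases htag : PySem.Int.band b0 0x1F = 0x1F
      · rw [if_pos htag, if_neg (by simpa using htag)]
        rw [pvLoopA_eq_scan]
        have hsc := pvScanCount octets index 0
        have hz : index + 1 + ((0 : Nat) : Int) = index + 1 := by push_cast; ring
        rw [hz] at hsc
        cases hs : DIO_scan octets (index + 1) with
        | none => rw [hs] at hsc; simp [hsc]
        | some r =>
            obtain ⟨parts, last, e⟩ := r
            rw [hs] at hsc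
            obtain ⟨h1, h2, h3, h4⟩ := hsc
            simp only [Nat.zero_add] at h1 h3
            rw [h1]
            simp only [Option.map_some]
            have hzero : ((0 : Int) <<< 7) = 0 := by decide
            have hf := pvFoldAB parts 0 last
            rw [hzero] at hf
            have hbfold : (List.range parts.length).foldl
                (fun a (k : Nat) => PySem.Int.bor (a <<< 7)
                  (PySem.Int.band ((PySem.List.pyGet? octets (index + 1 + (k : Int))).getD 0) 0x7F)) 0
                = parts.foldl (fun a b => PySem.Int.bor (a <<< 7) b) 0 := by
              rw [List.range_eq_range']; exact h4 0
            have hlast : (PySem.List.pyGet? octets (index + 1 + (parts.length : Int))).getD 0 = last := by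
              rw [h3]; rfl
            have htageq : PySem.Int.bor (parts.foldl (fun a b => (PySem.Int.bor a b) <<< 7) 0) last
                = PySem.Int.bor
                    (((List.range parts.length).foldl
                      (fun a (k : Nat) => PySem.Int.bor (a <<< 7)
                        (PySem.Int.band ((PySem.List.pyGet? octets (index + 1 + (k : Int))).getD 0) 0x7F)) 0) <<< 7)
                    ((PySem.List.pyGet? octets (index + 1 + (parts.length : Int))).getD 0) := by
              rw [hbfold, hlast, hf, List.foldl_append]
              simp [List.foldl]
            have hend : e = index + (parts.length : Int) + 2 := by omega
            rw [← htageq, ← hend]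
      · rw [if_neg htag, if_pos (by simpa using htag)]
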